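-- pv_equiv track=rewrite | github.com/asergio-marques/f1_league_racing_bot | src/utils/results_formatter.py | _collapse_trailing_zeros
-- ===== SOURCE A (Python) =====
-- def _collapse_trailing_zeros(
--     rows: list[tuple[int, int]],
-- ) -> list[tuple[str, int]]:
--     """Collapse trailing zero-point positions into a single sentinel row.
--
--     Example: [(1,25),(2,18),(3,0),(4,0)] → [("1",25),("2",18),("3+",0)]
--
--     Returns all rows up to and including the last non-zero position as
--     ``("{pos}", pts)`` tuples. If any trailing zeros remain, appends a
--     ``("{n}+", 0)`` sentinel using the next position after the last non-zero.
--     If all rows are zero, returns a single ``("1+", 0)`` sentinel.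
--     """
--     if not rows:
--         return []
--
--     last_nonzero = -1
--     for i, (_, pts) in enumerate(rows):
--         if pts > 0:
--             last_nonzero = i
--
--     if last_nonzero == -1:
--         # All zeros
--         return [(f"{rows[0][0]}+", 0)]
--
--     result: list[tuple[str, int]] = [
--         (str(pos), pts) for pos, pts in rows[: last_nonzero + 1]
--     ]
--
--     if last_nonzero < len(rows) - 1:
--         next_pos = rows[last_nonzero + 1][0]
--         result.append((f"{next_pos}+", 0))
--
--     return result
-- ===== SOURCE B (Python) =====
-- def _collapse_trailing_zeros(
--     rows: list[tuple[int, int]],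
-- ) -> list[tuple[str, int]]:
--     """Single streaming pass: buffer zero-point rows, flush them when a
--     positive-point row arrives, and collapse any buffer left at the end
--     into one ``("{pos}+", 0)`` sentinel."""
--     result: list[tuple[str, int]] = []
--     pending: list[tuple[int, int]] = []
--     for pos, pts in rows:
--         if pts > 0:
--             for p, q in pending:
--                 result.append((str(p), q))
--             pending = []
--             result.append((str(pos), pts))
--         else:
--             pending.append((pos, pts))
--     if pending:
--         result.append((f"{pending[0][0]}+", 0))
--     return result
-- ===== Notes on version B (the rewrite author's own statement) =====
-- stated objective: alternative
-- what changed: Replaced A's two-phase approach (scan enumerate(rows) for the last positive-points index, then slice up to it and index the next row for the sentinel) by a single streaming pass that buffers zero-point rows in a pending list, flushes the buffer when a positive row arrives, and collapses any leftover buffer into the sentinel.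
import Mathlib
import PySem

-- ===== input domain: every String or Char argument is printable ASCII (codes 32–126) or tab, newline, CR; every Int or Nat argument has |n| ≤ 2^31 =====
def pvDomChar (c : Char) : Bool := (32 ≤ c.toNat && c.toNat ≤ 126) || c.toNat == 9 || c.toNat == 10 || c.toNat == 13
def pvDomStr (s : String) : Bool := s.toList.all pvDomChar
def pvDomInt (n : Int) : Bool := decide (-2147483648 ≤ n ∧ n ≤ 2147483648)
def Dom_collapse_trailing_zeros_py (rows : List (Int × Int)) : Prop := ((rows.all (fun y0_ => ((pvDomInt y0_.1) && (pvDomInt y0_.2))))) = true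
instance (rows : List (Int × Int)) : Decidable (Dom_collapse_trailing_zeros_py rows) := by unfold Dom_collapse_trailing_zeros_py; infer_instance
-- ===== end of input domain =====

-- B replaces A's two-phase scan (find the last positive index, then slice and index)
-- by a single streaming pass with a pending buffer of zero-point rows; objective: alternative decomposition, same O(n) cost.

-- ===== PORT A =====
def collapse_trailing_zeros_py (rows : List (Int × Int)) : List (String × Int) :=
  if rows = [] then []
  else
    let last_nonzero : Int :=
      (PySem.List.enumerate rows).foldl
        (fun acc x => if x.2.2 > 0 then x.1 else acc) (-1)
    if last_nonzero = -1 then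
      -- all zeros: rows is nonempty here, rows[0][0]
      [(PySem.Int.toStr (PySem.List.pyGetD rows 0 (0, 0)).1 ++ "+", 0)]
    else
      let result :=
        (PySem.List.slice rows none (some (last_nonzero + 1))).map
          (fun r => (PySem.Int.toStr r.1, r.2))
      if last_nonzero < (rows.length : Int) - 1 then
        -- rows[last_nonzero + 1] is in range on this branch
        match PySem.List.pyGet? rows (last_nonzero + 1) with
        | some nxt => result ++ [(PySem.Int.toStr nxt.1 ++ "+", 0)]
        | none => result
      else result

-- ===== PORT B =====
-- loop body of Source B's single pass: state = (result, pending)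
def bStep (st : List (String × Int) × List (Int × Int)) (r : Int × Int) :
    List (String × Int) × List (Int × Int) :=
  if r.2 > 0 then
    (st.1 ++ st.2.map (fun p => (PySem.Int.toStr p.1, p.2)) ++ [(PySem.Int.toStr r.1, r.2)], [])
  else
    (st.1, st.2 ++ [r])

def collapse_trailing_zeros_py_alt (rows : List (Int × Int)) : List (String × Int) :=
  let st := rows.foldl bStep ([], [])
  match st.2 with
  | [] => st.1
  | p :: _ => st.1 ++ [(PySem.Int.toStr p.1 ++ "+", 0)]

-- ===== PRECONDITION & SPEC =====
def Spec_collapse_trailing_zeros_py (rows : List (Int × Int)) (out : List (String × Int)) : Prop := out = collapse_trailing_zeros_py_alt rows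
instance (rows : List (Int × Int)) (out : List (String × Int)) : Decidable (Spec_collapse_trailing_zeros_py rows out) := by unfold Spec_collapse_trailing_zeros_py; infer_instance

-- ===== CLAIM (what is proved, stated in full; the proofs are below) =====
def Claim_equal_collapse_trailing_zeros_py : Prop := ∀ (rows : List (Int × Int)), Dom_collapse_trailing_zeros_py rows → Spec_collapse_trailing_zeros_py rows (collapse_trailing_zeros_py rows)

-- ===== LEMMAS AND PROOFS =====

-- canonical value both programs compute, for a decomposition rows = u ++ v
def tailSentinel (v : List (Int × Int)) : List (String × Int) :=
  match v with
  | [] => []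
  | p :: _ => [(PySem.Int.toStr p.1 ++ "+", 0)]

-- every list splits as u ++ v with v all non-positive points and u empty or ending in a positive row
lemma decomp (rows : List (Int × Int)) :
    ∃ u v, rows = u ++ v ∧ (∀ r ∈ v, ¬ r.2 > 0) ∧
      (u = [] ∨ ∃ w a, u = w ++ [a] ∧ a.2 > 0) := by
  induction rows using List.reverseRecOn with
  | nil => exact ⟨[], [], by simp, by simp, Or.inl rfl⟩
  | append_singleton xs x ih =>
    by_cases hx : x.2 > 0
    · exact ⟨xs ++ [x], [], by simp, by simp, Or.inr ⟨xs, x, rfl, hx⟩⟩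
    · obtain ⟨u, v, he, hv, hu⟩ := ih
      refine ⟨u, v ++ [x], by simp [he], ?_, hu⟩
      intro r hr
      rcases List.mem_append.1 hr with h | h
      · exact hv r h
      · simp at h; subst h; exact hx

-- A's index-finding fold ignores a non-positive suffix
lemma fold_enum_nonpos (v : List (Int × Int)) (s : Int) (acc : Int)
    (hv : ∀ r ∈ v, ¬ r.2 > 0) :
    (PySem.List.enumerate v s).foldl (fun acc x => if x.2.2 > 0 then x.1 else acc) acc = acc := by
  induction v generalizing s acc with
  | nil => rfl
  | cons r rest ih =>
    simp only [PySem.List.enumerate_cons, List.foldl_cons]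
    rw [if_neg (hv r (by simp))]
    exact ih (s + 1) acc (fun r hr => hv r (by simp [hr]))

-- A's index-finding fold on a list ending in a positive row gives its last index
lemma fold_enum_last (w : List (Int × Int)) (a : Int × Int) (s : Int) (acc : Int)
    (ha : a.2 > 0) :
    (PySem.List.enumerate (w ++ [a]) s).foldl (fun acc x => if x.2.2 > 0 then x.1 else acc) acc
      = s + w.length := by
  rw [PySem.List.enumerate_append, List.foldl_append]
  simp [PySem.List.enumerate_cons, if_pos ha]

-- A's value on the decomposition
lemma A_eq (u v : List (Int × Int)) (hv : ∀ r ∈ v, ¬ r.2 > 0)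
    (hu : u = [] ∨ ∃ w a, u = w ++ [a] ∧ a.2 > 0) :
    collapse_trailing_zeros_py (u ++ v)
      = u.map (fun r => (PySem.Int.toStr r.1, r.2)) ++ tailSentinel v := by
  rcases hu with hu | ⟨w, a, hwa, ha⟩
  · subst hu
    cases v with
    | nil => rfl
    | cons p v' =>
      have hfold : (PySem.List.enumerate (p :: v') 0).foldl
          (fun acc x => if x.2.2 > 0 then x.1 else acc) (-1) = -1 :=
        fold_enum_nonpos _ 0 (-1) hv
      have hne : (p :: v' : List (Int × Int)) ≠ [] := by simp
      simp only [List.nil_append]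
      unfold collapse_trailing_zeros_py
      rw [if_neg hne, hfold]
      simp [tailSentinel, PySem.List.pyGetD_zero_cons]
  · subst hwa
    have hne : (w ++ [a]) ++ v ≠ [] := by simp
    have hfold : (PySem.List.enumerate ((w ++ [a]) ++ v) 0).foldl
        (fun acc x => if x.2.2 > 0 then x.1 else acc) (-1) = (w.length : Int) := by
      rw [PySem.List.enumerate_append, List.foldl_append, fold_enum_last w a 0 (-1) ha]
      rw [fold_enum_nonpos v _ _ hv]
      simp
    have hnneg : ((w.length : Int)) ≠ -1 := by omega
    have hslice : PySem.List.slice ((w ++ [a]) ++ v) none (some ((w.length : Int) + 1))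
        = w ++ [a] := by
      have : ((w.length : Int) + 1) = (((w ++ [a]).length : Nat) : Int) := by simp
      rw [this, PySem.List.slice_to_natCast, List.take_left]
    cases v with
    | nil =>
      have hcond : ¬ ((w.length : Int) < ((((w ++ [a]) ++ ([] : List (Int × Int))).length : Nat) : Int) - 1) := by
        simp
      simp only [collapse_trailing_zeros_py, if_neg hne, hfold, if_neg hnneg, hslice, if_neg hcond]
      simp [tailSentinel]
    | cons p v' =>
      have hcond : (w.length : Int) < ((((w ++ [a]) ++ (p :: v')).length : Nat) : Int) - 1 := by
        simp; omega
      have hget : PySem.List.pyGet? ((w ++ [a]) ++ (p :: v')) ((w.length : Int) + 1) = some p := by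
        have : ((w.length : Int) + 1) = (((w ++ [a]).length : Nat) : Int) := by simp
        rw [this, PySem.List.pyGet?_natCast]
        simp
      simp only [collapse_trailing_zeros_py, if_neg hne, hfold, if_neg hnneg, hslice,
        if_pos hcond, hget]
      simp [tailSentinel]

-- B's pass buffers a non-positive suffix unchanged
lemma b_fold_nonpos (v : List (Int × Int)) (res : List (String × Int)) (pend : List (Int × Int))
    (hv : ∀ r ∈ v, ¬ r.2 > 0) :
    v.foldl bStep (res, pend) = (res, pend ++ v) := by
  induction v generalizing pend with
  | nil => simp
  | cons r rest ih =>
    simp only [List.foldl_cons, bStep, if_neg (hv r (by simp))]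
    rw [ih (pend ++ [r]) (fun r hr => hv r (by simp [hr]))]
    simp

-- B's pass over a list ending in a positive row flushes everything in order
lemma b_fold_pos (u : List (Int × Int)) (res : List (String × Int)) (pend : List (Int × Int))
    (hu : ∃ w a, u = w ++ [a] ∧ a.2 > 0) :
    u.foldl bStep (res, pend)
      = (res ++ (pend ++ u).map (fun r => (PySem.Int.toStr r.1, r.2)), []) := by
  induction u generalizing res pend with
  | nil => obtain ⟨w, a, hwa, _⟩ := hu; simp at hwa
  | cons x rest ih =>
    obtain ⟨w, a, hwa, ha⟩ := hu
    cases w with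
    | nil =>
      simp only [List.nil_append] at hwa
      obtain ⟨hx, hrest⟩ := List.cons.inj hwa
      subst hx; subst hrest
      simp [bStep, if_pos ha]
    | cons y w' =>
      obtain ⟨hx, hrest⟩ := List.cons.inj hwa
      subst hx
      have hrest' : ∃ w a, rest = w ++ [a] ∧ a.2 > 0 := ⟨w', a, hrest, ha⟩
      by_cases hb : x.2 > 0
      · simp only [List.foldl_cons, bStep, if_pos hb]
        rw [ih _ _ hrest']
        simp
      · simp only [List.foldl_cons, bStep, if_neg hb]
        rw [ih _ _ hrest']
        simp

-- B's value on the decomposition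
lemma B_eq (u v : List (Int × Int)) (hv : ∀ r ∈ v, ¬ r.2 > 0)
    (hu : u = [] ∨ ∃ w a, u = w ++ [a] ∧ a.2 > 0) :
    collapse_trailing_zeros_py_alt (u ++ v)
      = u.map (fun r => (PySem.Int.toStr r.1, r.2)) ++ tailSentinel v := by
  rcases hu with hu | hu
  · subst hu
    simp only [collapse_trailing_zeros_py_alt, List.nil_append]
    rw [show (v.foldl bStep ([], [])) = (([] : List (String × Int)), v) from by
      simpa using b_fold_nonpos v [] [] hv]
    cases v with
    | nil => rfl
    | cons p v' => simp [tailSentinel]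
  · simp only [collapse_trailing_zeros_py_alt, List.foldl_append]
    rw [b_fold_pos u [] [] hu, b_fold_nonpos v _ [] hv]
    cases v with
    | nil => simp [tailSentinel]
    | cons p v' => simp [tailSentinel]

-- ===== VERDICT (by name: the statement is the Claim_ definition above) =====
theorem collapse_trailing_zeros_py_spec : Claim_equal_collapse_trailing_zeros_py := by
  intro rows _
  obtain ⟨u, v, he, hv, hu⟩ := decomp rows
  subst he
  unfold Spec_collapse_trailing_zeros_py
  rw [A_eq u v hv hu, B_eq u v hv hu]
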